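-- pv_equiv track=rewrite | github.com/FlanaganSe/Persistent-Agent-Memory | src/rkp/indexer/extractors/boundaries.py | _find_module_for_file
-- ===== SOURCE A (Python) =====
-- def _find_module_for_file(file_path: str, known_modules: dict[str, str]) -> str | None:
--     """Find the module that owns a given file path (longest prefix match)."""
--     normalized = file_path.replace("\\", "/")
--     best_match: str | None = None
--     best_length = 0
--     for mod_name, mod_path in known_modules.items():
--         if normalized.startswith(mod_path) and len(mod_path) > best_length:
--             best_match = mod_name
--             best_length = len(mod_path)
--     return best_match
-- ===== SOURCE B (Python) =====
-- def _find_module_for_file(file_path: str, known_modules: dict[str, str]) -> str | None: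
--     """Find the module that owns a given file path (longest prefix match)."""
--     normalized = file_path.replace("\\", "/")
--     for mod_name, mod_path in sorted(known_modules.items(),
--                                      key=lambda kv: len(kv[1]), reverse=True):
--         if mod_path and normalized.startswith(mod_path):
--             return mod_name
--     return None
-- ===== Notes on version B (the rewrite author's own statement) =====
-- stated objective: alternative
-- what changed: Replaces A's single-pass running-best accumulator by a staged sort-then-scan: stably sort all items by path length descending (Python's stable reverse sort keeps dict order among equal lengths, matching A's strict '>' tie-break) and return the first entry whose non-empty path is a prefix of the normalized file path.
import Mathlib
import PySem

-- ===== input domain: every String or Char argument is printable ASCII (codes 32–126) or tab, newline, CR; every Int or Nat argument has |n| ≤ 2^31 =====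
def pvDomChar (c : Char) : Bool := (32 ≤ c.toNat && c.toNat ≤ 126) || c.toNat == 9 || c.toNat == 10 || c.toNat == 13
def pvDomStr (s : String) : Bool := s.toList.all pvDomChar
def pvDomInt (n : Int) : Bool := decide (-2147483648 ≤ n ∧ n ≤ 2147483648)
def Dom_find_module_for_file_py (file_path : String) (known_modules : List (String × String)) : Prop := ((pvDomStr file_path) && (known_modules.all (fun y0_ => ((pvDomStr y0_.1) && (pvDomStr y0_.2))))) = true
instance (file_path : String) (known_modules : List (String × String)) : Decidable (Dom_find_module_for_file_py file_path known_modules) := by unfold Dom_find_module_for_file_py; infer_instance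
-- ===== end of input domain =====

-- B replaces A's running-best accumulator pass by a staged sort-then-scan (stable descending sort by path length, then first match); same result, different decomposition, not claimed faster.


-- ===== PORT A =====
def find_module_for_file_py (file_path : String) (known_modules : List (String × String)) : Option String :=
  let normalized := PySem.Str.replace file_path "\\" "/"
  let r := (PySem.Dict.ofList known_modules).items.foldl
    (fun (acc : Option String × Int) p =>
      if PySem.Str.startswith normalized p.2 && decide (PySem.Str.len p.2 > acc.2)
      then (some p.1, PySem.Str.len p.2) else acc)
    (none, 0)
  r.1

-- ===== PORT B =====
-- Source B: sort the items stably by len(path) descending, then return the first whose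
-- non-empty path is a prefix of the normalized file path (the for-loop with early
-- return is List.find?).
def find_module_for_file_py_alt (file_path : String) (known_modules : List (String × String)) : Option String :=
  let normalized := PySem.Str.replace file_path "\\" "/"
  match (PySem.List.sorted (PySem.Dict.ofList known_modules).items
          (fun p => PySem.Str.len p.2) true).find?
        (fun p => !(p.2 == "") && PySem.Str.startswith normalized p.2) with
  | none => none
  | some p => some p.1

-- ===== PRECONDITION & SPEC =====
def Spec_find_module_for_file_py (file_path : String) (known_modules : List (String × String)) (out : Option String) : Prop := out = find_module_for_file_py_alt file_path known_modules
instance (file_path : String) (known_modules : List (String × String)) (out : Option String) : Decidable (Spec_find_module_for_file_py file_path known_modules out) := by unfold Spec_find_module_for_file_py; infer_instance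

-- ===== CLAIM (what is proved, stated in full; the proofs are below) =====
def Claim_equal_find_module_for_file_py : Prop := ∀ (file_path : String) (known_modules : List (String × String)), Dom_find_module_for_file_py file_path known_modules → Spec_find_module_for_file_py file_path known_modules (find_module_for_file_py file_path known_modules)

-- ===== LEMMAS AND PROOFS =====

/-- A's loop body. -/
def pvStepA (s : String) (a : Option String × Int) (p : String × String) : Option String × Int :=
  if PySem.Str.startswith s p.2 && decide (PySem.Str.len p.2 > a.2)
  then (some p.1, PySem.Str.len p.2) else a

/-- "first element with maximal path length" as a left fold (strict '<': ties keep the earlier element). -/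
def pvStepM (a : Option (String × String)) (x : String × String) : Option (String × String) :=
  match a with
  | none => some x
  | some m => if PySem.Str.len m.2 < PySem.Str.len x.2 then some x else some m

/-- A's accumulator (best name, best length) as a function of the best pair. -/
def pvProj : Option (String × String) → Option String × Int
  | none => (none, 0)
  | some m => (some m.1, PySem.Str.len m.2)

theorem pvLenPos (x : String) (h : (x == "") = false) : 0 < PySem.Str.len x := by
  have hx : x ≠ "" := by simpa using h
  have hnil : x.toList ≠ [] := fun hn => hx (by
    have := congrArg String.ofList hn
    simpa using this)
  have : 0 < x.toList.length := List.length_pos_iff.mpr hnil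
  simp only [PySem.Str.len]
  exact_mod_cast this

theorem pvInvStepM (acc : Option (String × String)) (p : String × String)
    (hne : (p.2 == "") = false)
    (hacc : ∀ m, acc = some m → 0 < PySem.Str.len m.2) :
    ∀ m, pvStepM acc p = some m → 0 < PySem.Str.len m.2 := by
  intro m hm
  cases acc with
  | none => cases hm; exact pvLenPos p.2 hne
  | some b =>
    simp only [pvStepM] at hm
    split at hm <;> cases hm
    · exact pvLenPos p.2 hne
    · exact hacc _ rfl

theorem pvStep_agree (s : String) (p : String × String) (acc : Option (String × String))
    (hsw : PySem.Str.startswith s p.2 = true) (hne : (p.2 == "") = false)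
    (hacc : ∀ m, acc = some m → 0 < PySem.Str.len m.2) :
    pvStepA s (pvProj acc) p = pvProj (pvStepM acc p) := by
  cases acc with
  | none =>
    have hp := pvLenPos p.2 hne
    have hc : (PySem.Str.startswith s p.2
        && decide (PySem.Str.len p.2 > (pvProj (none : Option (String × String))).2)) = true := by
      rw [hsw, Bool.true_and, decide_eq_true_eq]
      exact hp
    unfold pvStepA
    rw [hc]
    rfl
  | some m =>
    by_cases hlt : PySem.Str.len m.2 < PySem.Str.len p.2
    · have hc : (PySem.Str.startswith s p.2
          && decide (PySem.Str.len p.2 > (pvProj (some m)).2)) = true := by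
        rw [hsw, Bool.true_and, decide_eq_true_eq]
        exact hlt
      have hm : pvStepM (some m) p = some p := by
        show (if PySem.Str.len m.2 < PySem.Str.len p.2 then some p else some m) = some p
        rw [if_pos hlt]
      unfold pvStepA
      rw [hc, hm]
      rfl
    · have hc : (PySem.Str.startswith s p.2
          && decide (PySem.Str.len p.2 > (pvProj (some m)).2)) = false := by
        rw [hsw, Bool.true_and, decide_eq_false_iff_not]
        exact hlt
      have hm : pvStepM (some m) p = some m := by
        show (if PySem.Str.len m.2 < PySem.Str.len p.2 then some p else some m) = some m
        rw [if_neg hlt]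
      unfold pvStepA
      rw [hc, hm]
      rfl

theorem pvStepA_skip (s : String) (p : String × String) (acc : Option (String × String))
    (hq : (!(p.2 == "") && PySem.Str.startswith s p.2) = false)
    (hacc : ∀ m, acc = some m → 0 < PySem.Str.len m.2) :
    pvStepA s (pvProj acc) p = pvProj acc := by
  rcases Bool.and_eq_false_iff.mp hq with h | h
  · -- p.2 = "" : its length 0 never beats the (nonnegative) best length
    have hp2 : p.2 = "" := by
      have : (p.2 == "") = true := by
        cases hb : (p.2 == "") with
        | true => rfl
        | false => rw [hb] at h; simp at h
      simpa using this
    have h0 : PySem.Str.len p.2 = 0 := by simp [hp2, PySem.Str.len]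
    have hd : decide (PySem.Str.len p.2 > (pvProj acc).2) = false := by
      rw [decide_eq_false_iff_not, h0]
      cases acc with
      | none => simp [pvProj]
      | some m =>
        have := hacc m rfl
        simp only [pvProj, not_lt]
        omega
    unfold pvStepA
    rw [hd, Bool.and_false]
    rfl
  · unfold pvStepA
    rw [h, Bool.false_and]
    rfl

/-- A's running-best loop computes (the projection of) the first-maximum fold over the matching items. -/
theorem pvMain (s : String) (l : List (String × String)) :
    ∀ (acc : Option (String × String)),
    (∀ m, acc = some m → 0 < PySem.Str.len m.2) →
    l.foldl (pvStepA s) (pvProj acc)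
    = pvProj ((l.filter (fun p => !(p.2 == "") && PySem.Str.startswith s p.2)).foldl pvStepM acc) := by
  induction l with
  | nil => intro acc _; rfl
  | cons p t ih =>
    intro acc hacc
    by_cases hq : (!(p.2 == "") && PySem.Str.startswith s p.2) = true
    · have hne : (p.2 == "") = false := by
        cases hb : (p.2 == "") with
        | false => rfl
        | true => rw [hb] at hq; simp at hq
      have hsw : PySem.Str.startswith s p.2 = true := (Bool.and_eq_true_iff.mp hq).2
      have hfil := List.filter_cons_of_pos
        (l := t) (a := p) (p := fun q => !(q.2 == "") && PySem.Str.startswith s q.2) hq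
      rw [hfil, List.foldl_cons, List.foldl_cons, pvStep_agree s p acc hsw hne hacc]
      exact ih (pvStepM acc p) (pvInvStepM acc p hne hacc)
    · have hq' : (!(p.2 == "") && PySem.Str.startswith s p.2) = false :=
        Bool.eq_false_iff.mpr hq
      have hfil := List.filter_cons_of_neg
        (l := t) (a := p) (p := fun q => !(q.2 == "") && PySem.Str.startswith s q.2) (by simpa using hq)
      rw [hfil, List.foldl_cons, pvStepA_skip s p acc hq' hacc]
      exact ih acc hacc

theorem pvA_eq (fp : String) (km : List (String × String)) :
    find_module_for_file_py fp km
      = (List.foldl (pvStepA (PySem.Str.replace fp "\\" "/")) (pvProj none)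
          (PySem.Dict.ofList km).items).1 := rfl

/-- post-processing of the found pair (the match at the end of B's port). -/
def pvPost : Option (String × String) → Option String
  | none => none
  | some p => some p.1

/-- Inserting one element into a descending-sorted list: the first match of the result
is A's strict-max step applied to the old first match (when the new element matches). -/
theorem pvFind_insertBy (s : String) (x : String × String) (ys : List (String × String))
    (h : ys.Pairwise (fun a b => PySem.Str.len b.2 ≤ PySem.Str.len a.2)) :
    (PySem.List.insertBy (fun a b => decide (PySem.Str.len b.2 < PySem.Str.len a.2)) x ys).find?
        (fun p => !(p.2 == "") && PySem.Str.startswith s p.2)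
    = if (!(x.2 == "") && PySem.Str.startswith s x.2)
      then pvStepM (ys.find? (fun p => !(p.2 == "") && PySem.Str.startswith s p.2)) x
      else ys.find? (fun p => !(p.2 == "") && PySem.Str.startswith s p.2) := by
  induction ys with
  | nil =>
    by_cases hx : (!(x.2 == "") && PySem.Str.startswith s x.2) = true
    · rw [if_pos hx]
      show List.find? (fun p => !(p.2 == "") && PySem.Str.startswith s p.2) [x] = _
      rw [List.find?_cons_of_pos (p := fun (p : String × String) => !(p.2 == "") && PySem.Str.startswith s p.2)
        (l := []) hx]
      rfl
    · rw [if_neg hx]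
      show List.find? (fun p => !(p.2 == "") && PySem.Str.startswith s p.2) [x] = _
      rw [List.find?_cons_of_neg (p := fun (p : String × String) => !(p.2 == "") && PySem.Str.startswith s p.2)
        (l := []) hx]
  | cons y t ih =>
    rcases List.pairwise_cons.mp h with ⟨hy, ht⟩
    show (if decide (PySem.Str.len y.2 < PySem.Str.len x.2) = true
        then x :: y :: t
        else y :: PySem.List.insertBy (fun a b => decide (PySem.Str.len b.2 < PySem.Str.len a.2)) x t).find?
          (fun p => !(p.2 == "") && PySem.Str.startswith s p.2) = _
    by_cases hlt : PySem.Str.len y.2 < PySem.Str.len x.2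
    · rw [if_pos (decide_eq_true hlt)]
      by_cases hx : (!(x.2 == "") && PySem.Str.startswith s x.2) = true
      · rw [if_pos hx,
            List.find?_cons_of_pos (p := fun p => !(p.2 == "") && PySem.Str.startswith s p.2)
              (l := y :: t) hx]
        cases r : (y :: t).find? (fun p => !(p.2 == "") && PySem.Str.startswith s p.2) with
        | none => rfl
        | some m =>
          have hm : m ∈ y :: t := List.mem_of_find?_eq_some r
          have hle : PySem.Str.len m.2 ≤ PySem.Str.len y.2 := by
            rcases List.mem_cons.mp hm with hm' | hm'
            · rw [hm']
            · exact hy m hm'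
          show some x = pvStepM (some m) x
          simp only [pvStepM]
          rw [if_pos (lt_of_le_of_lt hle hlt)]
      · rw [if_neg hx,
            List.find?_cons_of_neg (p := fun p => !(p.2 == "") && PySem.Str.startswith s p.2)
              (l := y :: t) hx]
    · rw [if_neg (by rw [decide_eq_true_eq]; exact hlt)]
      by_cases hy' : (!(y.2 == "") && PySem.Str.startswith s y.2) = true
      · rw [List.find?_cons_of_pos (p := fun p => !(p.2 == "") && PySem.Str.startswith s p.2)
              (l := PySem.List.insertBy (fun a b => decide (PySem.Str.len b.2 < PySem.Str.len a.2)) x t) hy',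
            List.find?_cons_of_pos (p := fun p => !(p.2 == "") && PySem.Str.startswith s p.2)
              (l := t) hy']
        by_cases hx : (!(x.2 == "") && PySem.Str.startswith s x.2) = true
        · rw [if_pos hx]
          show some y = pvStepM (some y) x
          simp only [pvStepM]
          rw [if_neg hlt]
        · rw [if_neg hx]
      · rw [List.find?_cons_of_neg (p := fun p => !(p.2 == "") && PySem.Str.startswith s p.2)
              (l := PySem.List.insertBy (fun a b => decide (PySem.Str.len b.2 < PySem.Str.len a.2)) x t) hy',
            List.find?_cons_of_neg (p := fun p => !(p.2 == "") && PySem.Str.startswith s p.2)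
              (l := t) hy',
            ih ht]

/-- B's sort-then-first-match equals the first-maximum fold over the matching items. -/
theorem pvB_main (s : String) (l : List (String × String)) :
    (PySem.List.sorted l (fun p => PySem.Str.len p.2) true).find?
        (fun p => !(p.2 == "") && PySem.Str.startswith s p.2)
    = (l.filter (fun p => !(p.2 == "") && PySem.Str.startswith s p.2)).foldl pvStepM none := by
  induction l using List.reverseRecOn with
  | nil => rfl
  | append_singleton l x ih =>
    have hsort : PySem.List.sorted (l ++ [x]) (fun p => PySem.Str.len p.2) true
        = PySem.List.insertBy (fun a b => decide (PySem.Str.len b.2 < PySem.Str.len a.2)) x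
            (PySem.List.sorted l (fun p => PySem.Str.len p.2) true) := by
      rw [PySem.List.sorted_rev_eq_foldl_insertBy, PySem.List.sorted_rev_eq_foldl_insertBy,
          List.foldl_append, List.foldl_cons, List.foldl_nil]
    rw [hsort, pvFind_insertBy s x _
        (PySem.List.sorted_pairwise_rev l (fun p => PySem.Str.len p.2)), ih,
        List.filter_append, List.foldl_append]
    by_cases hx : (!(x.2 == "") && PySem.Str.startswith s x.2) = true
    · rw [if_pos hx,
          List.filter_cons_of_pos (p := fun (p : String × String) => !(p.2 == "") && PySem.Str.startswith s p.2)
            (l := []) hx, List.filter_nil, List.foldl_cons, List.foldl_nil]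
    · rw [if_neg hx,
          List.filter_cons_of_neg (p := fun (p : String × String) => !(p.2 == "") && PySem.Str.startswith s p.2)
            (l := []) hx, List.filter_nil, List.foldl_nil]

theorem pvAlt_eq (fp : String) (km : List (String × String)) :
    find_module_for_file_py_alt fp km
      = pvPost ((PySem.List.sorted (PySem.Dict.ofList km).items
            (fun p => PySem.Str.len p.2) true).find?
          (fun p => !(p.2 == "") && PySem.Str.startswith (PySem.Str.replace fp "\\" "/") p.2)) := by
  show (match (PySem.List.sorted (PySem.Dict.ofList km).items
            (fun p => PySem.Str.len p.2) true).find?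
          (fun p => !(p.2 == "") && PySem.Str.startswith (PySem.Str.replace fp "\\" "/") p.2) with
    | none => none
    | some p => some p.1) = _
  generalize (PySem.List.sorted (PySem.Dict.ofList km).items
            (fun p => PySem.Str.len p.2) true).find?
          (fun p => !(p.2 == "") && PySem.Str.startswith (PySem.Str.replace fp "\\" "/") p.2) = o
  cases o <;> rfl

-- ===== VERDICT (by name: the statement is the Claim_ definition above) =====
theorem find_module_for_file_py_spec : Claim_equal_find_module_for_file_py := by
  intro file_path known_modules _
  unfold Spec_find_module_for_file_py
  rw [pvA_eq,
      pvMain (PySem.Str.replace file_path "\\" "/") (PySem.Dict.ofList known_modules).items none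
        (by intro m h; cases h),
      pvAlt_eq, pvB_main]
  cases ((PySem.Dict.ofList known_modules).items.filter
      (fun p => !(p.2 == "") && PySem.Str.startswith (PySem.Str.replace file_path "\\" "/") p.2)).foldl
        pvStepM none <;> rfl
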